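-- pv_equiv track=rewrite | github.com/Furash/chordsong | core/engine.py | _get_token_parts
-- ===== SOURCE A (Python) =====
-- def _get_token_parts(token: str) -> tuple[set[str], str]:
--     """Split a token into a set of modifiers and a base key."""
--     mod_symbols = {'#', '^', '!', '+'}
--     found_mods = set()
--     res = token
--
--     i = 0
--     while i < len(res):
--         char = res[i]
--         if char in mod_symbols:
--             found_mods.add(char)
--             i += 1
--         elif (char == '<' or char == '>') and i + 1 < len(res) and res[i+1] in mod_symbols:
--             # Side-specific modifier (e.g. <^ )
--             found_mods.add(res[i:i+2])
--             i += 2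
--         else:
--             break
--
--     base = res[i:]
--     # Accept common aliases for the Grave/Tilde key so users can type either form:
--     # - ` / backtick  == grave
--     # - ~ / tilde     == +grave
--     if base in ("`", "backtick"):
--         base = "grave"
--     elif base in ("~", "tilde"):
--         found_mods.add('+')
--         base = "grave"
--     # Accept common shifted punctuation aliases (users may type the literal character
--     # instead of the canonical "+<base>" form):
--     # - <  == +,
--     # - >  == +.
--     # - :  == +;
--     # - "  == +'
--     # - {  == +[
--     # - }  == +]
--     # - ?  == +/
--     # - |  == +\
--     _shifted_punct_aliases = {
--         "<": ",",
--         ">": ".",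
--         ":": ";",
--         '"': "'",
--         "{": "[",
--         "}": "]",
--         "?": "/",
--         "|": "\\",
--     }
--     if base in _shifted_punct_aliases:
--         found_mods.add('+')
--         base = _shifted_punct_aliases[base]
--     # If base is a single uppercase letter, it implies a shift modifier
--     if len(base) == 1 and base.isupper():
--         found_mods.add('+')
--         base = base.lower()
--
--     return found_mods, base
-- ===== SOURCE B (Python) =====
-- import re
--
-- _MOD_PREFIX = re.compile(r'(?:[<>]?[#^!+])*')
-- _MOD_UNIT = re.compile(r'[<>]?[#^!+]')
--
-- # alias base -> (implies shift, canonical base)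
-- _BASE_ALIASES = {
--     "`": (False, "grave"), "backtick": (False, "grave"),
--     "~": (True, "grave"), "tilde": (True, "grave"),
--     "<": (True, ","), ">": (True, "."), ":": (True, ";"),
--     '"': (True, "'"), "{": (True, "["), "}": (True, "]"),
--     "?": (True, "/"), "|": (True, "\\"),
-- }
--
--
-- def _get_token_parts(token: str) -> tuple[set, str]:
--     m = _MOD_PREFIX.match(token)
--     found_mods = set(_MOD_UNIT.findall(m.group(0)))
--     base = token[m.end():]
--     if base in _BASE_ALIASES:
--         shift, base = _BASE_ALIASES[base]
--         if shift:
--             found_mods.add('+')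
--     elif len(base) == 1 and base.isupper():
--         found_mods.add('+')
--         base = base.lower()
--     return found_mods, base
-- ===== Notes on version B (the rewrite author's own statement) =====
-- stated objective: idiomatic
-- what changed: The manual index/while scan of the modifier prefix is replaced by a single anchored regex match plus findall over the matched prefix, and the three separate alias if-chains (grave aliases, shifted-punct dict, uppercase letter) are collapsed into one alias table mapping base -> (implies-shift, canonical base) with an elif for the uppercase case.
import Mathlib
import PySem

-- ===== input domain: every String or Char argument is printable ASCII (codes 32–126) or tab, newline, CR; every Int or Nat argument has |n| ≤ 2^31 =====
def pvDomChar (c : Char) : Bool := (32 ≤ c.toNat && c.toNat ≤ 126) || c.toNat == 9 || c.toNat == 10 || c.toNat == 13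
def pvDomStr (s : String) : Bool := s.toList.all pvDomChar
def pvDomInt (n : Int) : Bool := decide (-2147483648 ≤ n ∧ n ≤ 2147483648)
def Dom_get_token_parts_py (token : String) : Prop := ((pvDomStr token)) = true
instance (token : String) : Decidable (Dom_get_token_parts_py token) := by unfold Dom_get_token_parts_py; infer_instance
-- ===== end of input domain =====

-- B replaces A's manual index/while prefix scan with a regex-style unit scan and
-- collapses A's three alias if-chains into one alias table (objective: idiomatic).

-- ===== PORT A =====
-- mod_symbols = {'#', '^', '!', '+'}  (a set literal used only for membership)
def pvAmods : PySem.Set Char := PySem.Set.ofList ['#', '^', '!', '+']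

-- the while-loop: state (found_mods, remaining chars res[i:]); each iteration either
-- consumes one mod char, consumes a '<'/'>' + mod pair, or breaks
def pvAloop (mods : PySem.Set String) : List Char → PySem.Set String × List Char
  | [] => (mods, [])
  | c :: rest =>
    if c ∈ pvAmods then pvAloop (PySem.Set.add mods (String.ofList [c])) rest
    else if (c = '<' ∨ c = '>') then
      match rest with
      | [] => (mods, [c])                 -- i + 1 < len(res) fails → break
      | c2 :: rest2 =>
        if c2 ∈ pvAmods then pvAloop (PySem.Set.add mods (String.ofList [c, c2])) rest2
        else (mods, c :: c2 :: rest2)     -- break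
    else (mods, c :: rest)                -- break

def pvAShift : PySem.Dict String String :=
  PySem.Dict.ofList [("<", ","), (">", "."), (":", ";"), ("\"", "'"),
                     ("{", "["), ("}", "]"), ("?", "/"), ("|", "\\")]

-- the alias tail, after the loop: grave/tilde aliases, shifted punctuation dict,
-- single uppercase letter implies shift
def pvAtail (mods : PySem.Set String) (base : List Char) : List String × String :=
  let p1 : PySem.Set String × List Char :=
    if base = "`".toList ∨ base = "backtick".toList then (mods, "grave".toList)
    else if base = "~".toList ∨ base = "tilde".toList then
      (PySem.Set.add mods "+", "grave".toList)
    else (mods, base)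
  let p2 : PySem.Set String × List Char :=
    match pvAShift.get? (String.ofList p1.2) with
    | some v => (PySem.Set.add p1.1 "+", v.toList)
    | none => p1
  match p2.2 with
  | [c] =>
    if PySem.Chars.isupper c then (PySem.Set.add p2.1 "+", String.ofList [PySem.Chars.lowerChar c])
    else (p2.1, String.ofList [c])
  | _ => (p2.1, String.ofList p2.2)

def get_token_parts_py (token : String) : List String × String :=
  let r := pvAloop PySem.Set.empty token.toList
  pvAtail r.1 r.2

-- ===== PORT B =====
-- hand port of the regex r'(?:[<>]?[#^!+])*' anchored match together with
-- re.findall(r'[<>]?[#^!+]', prefix): returns (list of matched units, remainder).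
-- Exact: the greedy regex consumes units [<>]?[#^!+] while they match, exactly
-- this deterministic scan (no backtracking can extend or shorten the match).
def pvBscan : List Char → List String × List Char
  | [] => ([], [])
  | c :: rest =>
    if c ∈ (['#', '^', '!', '+'] : List Char) then
      let r := pvBscan rest
      (String.ofList [c] :: r.1, r.2)
    else if c = '<' ∨ c = '>' then
      match rest with
      | [] => ([], [c])
      | c2 :: rest2 =>
        if c2 ∈ (['#', '^', '!', '+'] : List Char) then
          let r := pvBscan rest2
          (String.ofList [c, c2] :: r.1, r.2)
        else ([], c :: c2 :: rest2)
    else ([], c :: rest)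

-- one alias table: base -> (implies shift, canonical base)
def pvBalias : PySem.Dict String (Bool × String) :=
  PySem.Dict.ofList
    [("`", (false, "grave")), ("backtick", (false, "grave")),
     ("~", (true, "grave")), ("tilde", (true, "grave")),
     ("<", (true, ",")), (">", (true, ".")), (":", (true, ";")),
     ("\"", (true, "'")), ("{", (true, "[")), ("}", (true, "]")),
     ("?", (true, "/")), ("|", (true, "\\"))]

def pvBtail (mods : PySem.Set String) (base : List Char) : List String × String :=
  match pvBalias.get? (String.ofList base) with
  | some sb => (if sb.1 then PySem.Set.add mods "+" else mods, sb.2)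
  | none =>
    match base with
    | [c] =>
      if PySem.Chars.isupper c then (PySem.Set.add mods "+", String.ofList [PySem.Chars.lowerChar c])
      else (mods, String.ofList [c])
    | _ => (mods, String.ofList base)

def get_token_parts_py_alt (token : String) : List String × String :=
  let r := pvBscan token.toList
  pvBtail (PySem.Set.ofList r.1) r.2

-- ===== PRECONDITION & SPEC =====
def Spec_get_token_parts_py (token : String) (out : List String × String) : Prop := out = get_token_parts_py_alt token
instance (token : String) (out : List String × String) : Decidable (Spec_get_token_parts_py token out) := by unfold Spec_get_token_parts_py; infer_instance

-- ===== CLAIM (what is proved, stated in full; the proofs are below) =====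
def Claim_equal_get_token_parts_py : Prop := ∀ (token : String), Dom_get_token_parts_py token → Spec_get_token_parts_py token (get_token_parts_py token)

-- ===== LEMMAS AND PROOFS =====

-- A's accumulating loop is B's unit scan folded into the set
theorem pv_loop_eq_scan (cs : List Char) (mods : PySem.Set String) :
    pvAloop mods cs = ((pvBscan cs).1.foldl PySem.Set.add mods, (pvBscan cs).2) := by
  induction cs using pvBscan.induct generalizing mods
  all_goals rw [pvAloop.eq_def, pvBscan.eq_def]
  all_goals simp [pvAmods, PySem.Set.ofList, List.foldl, *]

-- A's three alias stages equal B's single table lookup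
theorem pv_tail_eq (mods : PySem.Set String) (base : List Char) :
    pvAtail mods base = pvBtail mods base := by
  by_cases h1 : base = ['`']
  · subst h1
    simp [pvAtail, pvBtail,
      show pvAShift.get? "grave" = none from by decide,
      show pvBalias.get? "`" = some (false, "grave") from by decide]
  by_cases h2 : base = ['b', 'a', 'c', 'k', 't', 'i', 'c', 'k']
  · subst h2
    simp [pvAtail, pvBtail,
      show pvAShift.get? "grave" = none from by decide,
      show pvBalias.get? "backtick" = some (false, "grave") from by decide]
  by_cases h3 : base = ['~']
  · subst h3
    simp [pvAtail, pvBtail,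
      show pvAShift.get? "grave" = none from by decide,
      show pvBalias.get? "~" = some (true, "grave") from by decide]
  by_cases h4 : base = ['t', 'i', 'l', 'd', 'e']
  · subst h4
    simp [pvAtail, pvBtail,
      show pvAShift.get? "grave" = none from by decide,
      show pvBalias.get? "tilde" = some (true, "grave") from by decide]
  by_cases h5 : base = ['<']
  · subst h5
    simp [pvAtail, pvBtail, PySem.Chars.isupper,
      show pvAShift.get? "<" = some "," from by decide,
      show pvBalias.get? "<" = some (true, ",") from by decide]
  by_cases h6 : base = ['>']
  · subst h6
    simp [pvAtail, pvBtail, PySem.Chars.isupper,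
      show pvAShift.get? ">" = some "." from by decide,
      show pvBalias.get? ">" = some (true, ".") from by decide]
  by_cases h7 : base = [':']
  · subst h7
    simp [pvAtail, pvBtail, PySem.Chars.isupper,
      show pvAShift.get? ":" = some ";" from by decide,
      show pvBalias.get? ":" = some (true, ";") from by decide]
  by_cases h8 : base = ['"']
  · subst h8
    simp [pvAtail, pvBtail, PySem.Chars.isupper,
      show pvAShift.get? "\"" = some "'" from by decide,
      show pvBalias.get? "\"" = some (true, "'") from by decide]
  by_cases h9 : base = ['{']
  · subst h9
    simp [pvAtail, pvBtail, PySem.Chars.isupper,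
      show pvAShift.get? "{" = some "[" from by decide,
      show pvBalias.get? "{" = some (true, "[") from by decide]
  by_cases h10 : base = ['}']
  · subst h10
    simp [pvAtail, pvBtail, PySem.Chars.isupper,
      show pvAShift.get? "}" = some "]" from by decide,
      show pvBalias.get? "}" = some (true, "]") from by decide]
  by_cases h11 : base = ['?']
  · subst h11
    simp [pvAtail, pvBtail, PySem.Chars.isupper,
      show pvAShift.get? "?" = some "/" from by decide,
      show pvBalias.get? "?" = some (true, "/") from by decide]
  by_cases h12 : base = ['|']
  · subst h12
    simp [pvAtail, pvBtail, PySem.Chars.isupper,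
      show pvAShift.get? "|" = some "\\" from by decide,
      show pvBalias.get? "|" = some (true, "\\") from by decide]
  -- base is none of the alias keys: both lookups miss and the uppercase stage is shared
  have hA : pvAShift.get? (String.ofList base) = none := by
    rw [PySem.Dict.get?_eq_none_iff_not_mem_keys,
        show pvAShift.keys = ["<", ">", ":", "\"", "{", "}", "?", "|"] from by decide]
    simp only [List.mem_cons, List.not_mem_nil, or_false, not_or]
    exact ⟨fun e => h5 (by simpa using congrArg String.toList e), fun e => h6 (by simpa using congrArg String.toList e), fun e => h7 (by simpa using congrArg String.toList e), fun e => h8 (by simpa using congrArg String.toList e), fun e => h9 (by simpa using congrArg String.toList e), fun e => h10 (by simpa using congrArg String.toList e), fun e => h11 (by simpa using congrArg String.toList e), fun e => h12 (by simpa using congrArg String.toList e)⟩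
  have hB : pvBalias.get? (String.ofList base) = none := by
    rw [PySem.Dict.get?_eq_none_iff_not_mem_keys,
        show pvBalias.keys = ["`", "backtick", "~", "tilde", "<", ">", ":", "\"", "{", "}", "?", "|"] from by decide]
    simp only [List.mem_cons, List.not_mem_nil, or_false, not_or]
    exact ⟨fun e => h1 (by simpa using congrArg String.toList e), fun e => h2 (by simpa using congrArg String.toList e), fun e => h3 (by simpa using congrArg String.toList e), fun e => h4 (by simpa using congrArg String.toList e), fun e => h5 (by simpa using congrArg String.toList e), fun e => h6 (by simpa using congrArg String.toList e), fun e => h7 (by simpa using congrArg String.toList e), fun e => h8 (by simpa using congrArg String.toList e), fun e => h9 (by simpa using congrArg String.toList e), fun e => h10 (by simpa using congrArg String.toList e), fun e => h11 (by simpa using congrArg String.toList e), fun e => h12 (by simpa using congrArg String.toList e)⟩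
  simp [pvAtail, pvBtail, hA, hB, h1, h2, h3, h4]
-- ===== VERDICT (by name: the statement is the Claim_ definition above) =====
theorem get_token_parts_py_spec : Claim_equal_get_token_parts_py := by
  intro token _
  show get_token_parts_py token = get_token_parts_py_alt token
  unfold get_token_parts_py get_token_parts_py_alt
  rw [pv_loop_eq_scan]
  rw [pv_tail_eq]
  rfl
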